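-- pv_equiv track=rewrite | github.com/derrick20/AI-Projects | 4-Regular Expressions/crossword_liang_d_broken.py | fill_protected_squares
-- ===== SOURCE A (Python) =====
-- BLOCKCHAR = "#"
--
-- OPENCHAR = "-"
--
-- PROTECTEDCHAR = "~"
--
-- def fill_protected_squares(xw):
--     b = BLOCKCHAR
--     p = PROTECTEDCHAR
--     o = OPENCHAR
--     cases = {  # these are the only ways we can deduce a square is protected
--         b + p + o + o: b + 3 * p,
--         b + p + p + o: b + 3 * p,
--         b + p + o + p: b + 3 * p, # UGH you can't assume that bp is followed by o's and p's, there may be blocks after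
--     }
--     for pos in range(len(xw)):
--         for case in cases:
--             length = len(case)
--             if xw[pos: pos + length] == case:  # note, we know for sure that we can always replace the ones ...
--                 xw = xw[:pos] + cases[case] + xw[pos + 4:]
--                 # ... beyond the block with protected, since they can't be blocks ...
--                 # ... (otherwise we would've filled in this area already). Also, all substitutions are length 4, good!
--     xw = xw[::-1]  # do this again, but we must mirror things, since replacement in strings works from left to right.
--     for pos in range(len(xw)):
--         for case in cases:
--             length = len(case)
--             if xw[pos: pos + length] == case:
--                 xw = xw[:pos] + cases[case] + xw[pos + 4:]
--     xw = xw[::-1]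
--     return xw
-- ===== SOURCE B (Python) =====
-- BLOCKCHAR = "#"
--
-- OPENCHAR = "-"
--
-- PROTECTEDCHAR = "~"
--
-- def _fix_start(seg):
--     # a segment that directly follows a block: if it starts with "~" and the next
--     # two squares are open/protected, all three are deducibly protected
--     if len(seg) >= 3 and seg[0] == '~' and seg[1] in '-~' and seg[2] in '-~':
--         return '~~~' + seg[3:]
--     return seg
--
-- def fill_protected_squares(xw):
--     segs = xw.split('#')
--     last = len(segs) - 1
--     out = []
--     for i, seg in enumerate(segs):
--         if i > 0:              # segment has a block on its left
--             seg = _fix_start(seg)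
--         if i < last:           # segment has a block on its right
--             seg = _fix_start(seg[::-1])[::-1]
--         out.append(seg)
--     return '#'.join(out)
-- ===== Notes on version B (the rewrite author's own statement) =====
-- stated objective: faster
-- what changed: A rescans every position against a dict of 4-char patterns and rebuilds the whole string on each match, then repeats the scan on the reversed string; B splits the string once at the block characters, fixes the two deducible squares at the flanked ends of each segment locally, and rejoins the segments.
import Mathlib
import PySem

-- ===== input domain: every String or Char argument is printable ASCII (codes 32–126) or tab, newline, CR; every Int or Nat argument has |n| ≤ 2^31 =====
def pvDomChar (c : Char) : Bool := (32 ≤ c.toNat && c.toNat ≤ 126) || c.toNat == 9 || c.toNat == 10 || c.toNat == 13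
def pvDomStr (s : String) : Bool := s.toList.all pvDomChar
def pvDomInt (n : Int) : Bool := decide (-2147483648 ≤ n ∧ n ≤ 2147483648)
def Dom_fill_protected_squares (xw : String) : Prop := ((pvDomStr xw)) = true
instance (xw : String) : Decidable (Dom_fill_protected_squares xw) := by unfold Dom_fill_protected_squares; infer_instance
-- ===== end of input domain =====

-- B replaces A's repeated positional rescans (a dict-pattern slice comparison at every position,
-- rebuilding the whole string on each match, twice) by splitting the string once on '#' and
-- fixing the two deducible end squares of each segment locally, then rejoining.

-- ===== PORT A =====
-- Strings are handled as their lists of code points (PySem convention); str '+' is '++'.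
-- the dict of deducible cases, keys built by concatenation as in A, in insertion order
def pvCasesA : PySem.Dict (List Char) (List Char) :=
  PySem.Dict.ofList
    [ (['#'] ++ ['~'] ++ ['-'] ++ ['-'], ['#'] ++ (['~'] ++ ['~'] ++ ['~']))
    , (['#'] ++ ['~'] ++ ['~'] ++ ['-'], ['#'] ++ (['~'] ++ ['~'] ++ ['~']))
    , (['#'] ++ ['~'] ++ ['-'] ++ ['~'], ['#'] ++ (['~'] ++ ['~'] ++ ['~'])) ]

-- body of the inner 'for case in cases' loop: compare xw[pos:pos+len(case)], maybe rebuild xw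
def pvCaseSub (pos : Int) (xw : List Char) (cr : List Char × List Char) : List Char :=
  let length : Int := PySem.List.len cr.1
  if PySem.List.slice xw (some pos) (some (pos + length)) = cr.1 then
    PySem.List.slice xw none (some pos) ++ cr.2 ++ PySem.List.slice xw (some (pos + 4)) none
  else xw

-- the inner loop at one position pos
def pvStepA (xw : List Char) (pos : Int) : List Char :=
  (PySem.Dict.items pvCasesA).foldl (pvCaseSub pos) xw

-- one 'for pos in range(len(xw))' scan
def pvPassA (xw : List Char) : List Char :=
  (PySem.List.pyRange 0 (PySem.List.len xw) 1).foldl pvStepA xw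

def fill_protected_squares (xw : String) : String :=
  let s1 := pvPassA xw.toList
  let s2 := (PySem.List.slice? s1 none none (-1)).getD []   -- xw[::-1]
  let s3 := pvPassA s2
  let s4 := (PySem.List.slice? s3 none none (-1)).getD []   -- xw[::-1]
  String.ofList s4

-- ===== PORT B =====
-- _fix_start: 'c in "-~"' on a single char is c == '-' or c == '~'; '~~~' + seg[3:]
def pvFixStart (seg : List Char) : List Char :=
  if 3 ≤ seg.length ∧ PySem.List.pyGet? seg 0 = some '~'
     ∧ (PySem.List.pyGet? seg 1 = some '-' ∨ PySem.List.pyGet? seg 1 = some '~')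
     ∧ (PySem.List.pyGet? seg 2 = some '-' ∨ PySem.List.pyGet? seg 2 = some '~')
  then ['~', '~', '~'] ++ PySem.List.slice seg (some 3) none
  else seg

-- split on '#', fix each segment's flanked ends (seg[::-1] is List.reverse), rejoin with '#'
def fill_protected_squares_alt (xw : String) : String :=
  let segs := PySem.Chars.splitOn xw.toList ['#']
  let last : Int := PySem.List.len segs - 1
  let out := (PySem.List.enumerate segs).map (fun p =>
    let seg1 := if 0 < p.1 then pvFixStart p.2 else p.2
    let seg2 := if p.1 < last then (pvFixStart seg1.reverse).reverse else seg1
    seg2)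
  String.ofList (PySem.Chars.join ['#'] out)

-- ===== PRECONDITION & SPEC =====
def Spec_fill_protected_squares (xw : String) (out : String) : Prop := out = fill_protected_squares_alt xw
instance (xw : String) (out : String) : Decidable (Spec_fill_protected_squares xw out) := by unfold Spec_fill_protected_squares; infer_instance

-- ===== CLAIM (what is proved, stated in full; the proofs are below) =====
def Claim_equal_fill_protected_squares : Prop := ∀ (xw : String), Dom_fill_protected_squares xw → Spec_fill_protected_squares xw (fill_protected_squares xw)

-- ===== LEMMAS AND PROOFS =====

-- ---- A-side reduction: one pass of A is a simultaneous in-place update (no cascading) ----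

-- proof-side: positional form of one pass (indices into the same list, updates in place)
def pvStepB (s : List Char) (i : Int) : List Char :=
  if PySem.List.pyGetD s i ' ' = '#' ∧ PySem.List.pyGetD s (i + 1) ' ' = '~'
      ∧ (PySem.List.pyGetD s (i + 2) ' ' = '-' ∨ PySem.List.pyGetD s (i + 2) ' ' = '~')
      ∧ (PySem.List.pyGetD s (i + 3) ' ' = '-' ∨ PySem.List.pyGetD s (i + 3) ' ' = '~') then
    PySem.List.pySetD (PySem.List.pySetD s (i + 2) '~') (i + 3) '~'
  else s

def pvScanN (u : List Char) : List Char :=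
  (List.range (u.length - 3)).foldl (fun (s : List Char) (p : Nat) => pvStepB s (p : Int)) u

theorem pvItemsA : PySem.Dict.items pvCasesA =
    [ (['#', '~', '-', '-'], ['#', '~', '~', '~'])
    , (['#', '~', '~', '-'], ['#', '~', '~', '~'])
    , (['#', '~', '-', '~'], ['#', '~', '~', '~']) ] := by decide

theorem pvSliceWin (v w : List Char) (a b c d : Char) :
    PySem.List.slice (v ++ a :: b :: c :: d :: w) (some (v.length : Int))
      (some ((v.length : Int) + 4)) = [a, b, c, d] := by
  rw [show ((v.length : Int) + 4) = ((v.length + 4 : Nat) : Int) by push_cast; ring,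
    PySem.List.slice_natCast, List.drop_left, Nat.add_sub_cancel_left]
  rfl

theorem pvDropWin (v w : List Char) (a b c d : Char) :
    PySem.List.slice (v ++ a :: b :: c :: d :: w) (some ((v.length : Int) + 4)) none = w := by
  rw [show v ++ a :: b :: c :: d :: w = (v ++ [a, b, c, d]) ++ w by simp,
    show ((v.length : Int) + 4) = (((v ++ [a, b, c, d]).length : Nat) : Int) by simp,
    PySem.List.slice_from_natCast, List.drop_left]

theorem pvSub_match (v w : List Char) (a b c d : Char) (key rep : List Char)
    (h : ([a, b, c, d] : List Char) = key) :
    pvCaseSub (v.length : Int) (v ++ a :: b :: c :: d :: w) (key, rep) = v ++ rep ++ w := by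
  unfold pvCaseSub
  rw [← h]
  simp only [PySem.List.len_eq, List.length_cons, List.length_nil]
  norm_num
  rw [pvSliceWin, if_pos rfl, pvDropWin]

theorem pvSub_miss (v w : List Char) (a b c d : Char) (key rep : List Char)
    (h : ([a, b, c, d] : List Char) ≠ key) (hk : key.length = 4) :
    pvCaseSub (v.length : Int) (v ++ a :: b :: c :: d :: w) (key, rep) =
      v ++ a :: b :: c :: d :: w := by
  unfold pvCaseSub
  simp only [PySem.List.len_eq, hk, Nat.cast_ofNat]
  rw [pvSliceWin, if_neg h]

theorem pvSub_short (u : List Char) (p : Nat) (key rep : List Char)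
    (hk : key.length = 4) (h : u.length < p + 4) :
    pvCaseSub (p : Int) u (key, rep) = u := by
  unfold pvCaseSub
  simp only [PySem.List.len_eq, hk, Nat.cast_ofNat]
  rw [if_neg]
  intro hEq
  have hlen := congrArg List.length hEq
  rw [PySem.List.length_slice, hk] at hlen
  rw [show ((p : Int) + 4) = ((p + 4 : Nat) : Int) by push_cast; ring] at hlen
  rw [PySem.List.clampIdx_natCast, PySem.List.clampIdx_natCast] at hlen
  omega

theorem pvStepA_decomp (v w : List Char) (a b c d : Char) :
    pvStepA (v ++ a :: b :: c :: d :: w) (v.length : Int) =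
      if a = '#' ∧ b = '~' ∧ (c = '-' ∨ c = '~') ∧ (d = '-' ∨ d = '~') then
        v ++ a :: b :: '~' :: '~' :: w
      else v ++ a :: b :: c :: d :: w := by
  unfold pvStepA
  rw [pvItemsA]
  simp only [List.foldl_cons, List.foldl_nil]
  by_cases h1 : ([a, b, c, d] : List Char) = ['#', '~', '-', '-']
  · obtain ⟨ha, hb, hc, hd⟩ : a = '#' ∧ b = '~' ∧ c = '-' ∧ d = '-' := by simpa using h1
    subst ha; subst hb; subst hc; subst hd
    rw [pvSub_match _ _ _ _ _ _ _ _ rfl,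
      show v ++ (['#', '~', '~', '~'] : List Char) ++ w = v ++ '#' :: '~' :: '~' :: '~' :: w by simp,
      pvSub_miss _ _ _ _ _ _ _ _ (by decide) rfl, pvSub_miss _ _ _ _ _ _ _ _ (by decide) rfl]
    simp
  · rw [pvSub_miss _ _ _ _ _ _ _ _ h1 rfl]
    by_cases h2 : ([a, b, c, d] : List Char) = ['#', '~', '~', '-']
    · obtain ⟨ha, hb, hc, hd⟩ : a = '#' ∧ b = '~' ∧ c = '~' ∧ d = '-' := by simpa using h2
      subst ha; subst hb; subst hc; subst hd
      rw [pvSub_match _ _ _ _ _ _ _ _ rfl,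
        show v ++ (['#', '~', '~', '~'] : List Char) ++ w = v ++ '#' :: '~' :: '~' :: '~' :: w by simp,
        pvSub_miss _ _ _ _ _ _ _ _ (by decide) rfl]
      simp
    · rw [pvSub_miss _ _ _ _ _ _ _ _ h2 rfl]
      by_cases h3 : ([a, b, c, d] : List Char) = ['#', '~', '-', '~']
      · obtain ⟨ha, hb, hc, hd⟩ : a = '#' ∧ b = '~' ∧ c = '-' ∧ d = '~' := by simpa using h3
        subst ha; subst hb; subst hc; subst hd
        rw [pvSub_match _ _ _ _ _ _ _ _ rfl]
        simp
      · rw [pvSub_miss _ _ _ _ _ _ _ _ h3 rfl]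
        by_cases hs : a = '#' ∧ b = '~' ∧ (c = '-' ∨ c = '~') ∧ (d = '-' ∨ d = '~')
        · obtain ⟨ha, hb, hc, hd⟩ := hs
          have hcd : c = '~' ∧ d = '~' := by
            rcases hc with hc | hc <;> rcases hd with hd | hd <;> simp_all
          rw [if_pos ⟨ha, hb, hc, hd⟩, hcd.1, hcd.2]
        · rw [if_neg hs]

theorem pvStepB_decomp (v w : List Char) (a b c d : Char) :
    pvStepB (v ++ a :: b :: c :: d :: w) (v.length : Int) =
      if a = '#' ∧ b = '~' ∧ (c = '-' ∨ c = '~') ∧ (d = '-' ∨ d = '~') then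
        v ++ a :: b :: '~' :: '~' :: w
      else v ++ a :: b :: c :: d :: w := by
  unfold pvStepB
  rw [show ((v.length : Int) + 1) = ((v.length + 1 : Nat) : Int) by push_cast; ring,
      show ((v.length : Int) + 2) = ((v.length + 2 : Nat) : Int) by push_cast; ring,
      show ((v.length : Int) + 3) = ((v.length + 3 : Nat) : Int) by push_cast; ring]
  simp only [PySem.List.pyGetD_natCast, PySem.List.pySetD_natCast]
  rw [List.set_append_right _ _ (by omega), List.set_append_right _ _ (by omega)]
  simp [List.getD]

theorem pvStepA_oob (u : List Char) (p : Nat) (h : u.length < p + 4) :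
    pvStepA u (p : Int) = u := by
  unfold pvStepA
  rw [pvItemsA]
  simp only [List.foldl_cons, List.foldl_nil]
  rw [pvSub_short _ _ _ _ rfl h, pvSub_short _ _ _ _ rfl h, pvSub_short _ _ _ _ rfl h]

theorem pvStep_eq (u : List Char) (p : Nat) (h : p + 4 ≤ u.length) :
    pvStepA u (p : Int) = pvStepB u (p : Int) := by
  obtain ⟨v, rest, hu, hv⟩ : ∃ v rest, u = v ++ rest ∧ v.length = p :=
    ⟨u.take p, u.drop p, (List.take_append_drop p u).symm, by simp; omega⟩
  have hr : 4 ≤ rest.length := by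
    have := congrArg List.length hu; simp at this; omega
  match rest, hr with
  | a :: b :: c :: d :: w, _ =>
    subst hu; rw [← hv, pvStepA_decomp, pvStepB_decomp]

theorem pvStepB_len (u : List Char) (i : Int) : (pvStepB u i).length = u.length := by
  unfold pvStepB; split <;> simp [PySem.List.length_pySetD]

theorem pvFoldB_len (m : Nat) (u : List Char) :
    ((List.range m).foldl (fun (s : List Char) (p : Nat) => pvStepB s (p : Int)) u).length
      = u.length := by
  induction m generalizing u with
  | zero => rfl
  | succ m ih => rw [List.range_succ, List.foldl_append]; simp [pvStepB_len, ih]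

theorem pvFold_eq (m : Nat) (u : List Char) (h : m + 3 ≤ u.length) :
    (List.range m).foldl (fun (s : List Char) (p : Nat) => pvStepA s (p : Int)) u =
    (List.range m).foldl (fun (s : List Char) (p : Nat) => pvStepB s (p : Int)) u := by
  induction m generalizing u with
  | zero => rfl
  | succ m ih =>
    rw [List.range_succ, List.foldl_append, List.foldl_append]
    simp only [List.foldl_cons, List.foldl_nil]
    rw [ih u (by omega), pvStep_eq]
    rw [pvFoldB_len]; omega

theorem pvFoldA_id (l : List Nat) (u : List Char) (h : u.length ≤ 3) :
    l.foldl (fun (s : List Char) (p : Nat) => pvStepA s (p : Int)) u = u := by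
  induction l with
  | nil => rfl
  | cons p l ih => simp only [List.foldl_cons]; rw [pvStepA_oob u p (by omega), ih]

-- A's pass equals the positional simultaneous pass
theorem pvPass_scan (u : List Char) : pvPassA u = pvScanN u := by
  unfold pvPassA pvScanN
  simp only [PySem.List.len_eq]
  rcases Nat.lt_or_ge u.length 3 with h | h
  · rw [show u.length - 3 = 0 from by omega]
    rw [PySem.List.pyRange_zero_natCast, List.foldl_map]
    simp only [List.range_zero, List.foldl_nil]
    exact pvFoldA_id _ u (by omega)
  · conv_lhs => rw [PySem.List.pyRange_zero_natCast, List.foldl_map,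
      show u.length = (u.length - 3) + 3 by omega, List.range_add, List.foldl_append]
    rw [pvFold_eq (u.length - 3) u (by omega)]
    have hlen := pvFoldB_len (u.length - 3) u
    set u' := (List.range (u.length - 3)).foldl
      (fun (s : List Char) (p : Nat) => pvStepB s (p : Int)) u with hu'
    rw [List.foldl_map, show List.range 3 = [0, 1, 2] from rfl]
    simp only [List.foldl_cons, List.foldl_nil]
    rw [pvStepA_oob u' (u.length - 3 + 0) (by omega),
      pvStepA_oob u' (u.length - 3 + 1) (by omega),
      pvStepA_oob u' (u.length - 3 + 2) (by omega)]

-- ---- segment model ----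

-- the per-segment start fix, as a pattern match (equal to B's pvFixStart)
def pvSegFwd : List Char → List Char
  | '~' :: c :: d :: rest =>
      if (c = '-' ∨ c = '~') ∧ (d = '-' ∨ d = '~') then '~' :: '~' :: '~' :: rest
      else '~' :: c :: d :: rest
  | s => s

-- apply the fix to every segment except the first (which has no '#' on its left)
def pvMapTail : List (List Char) → List (List Char)
  | [] => []
  | h :: t => h :: t.map pvSegFwd

-- one pass, segment-wise: fix the start of every segment that follows a '#'
def pvModelL (s : List Char) : List Char :=
  PySem.Chars.join ['#'] (pvMapTail (List.splitOnP (· == '#') s))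

theorem pvSegFwd_cons (a b c : Char) (rest : List Char) :
    pvSegFwd (a :: b :: c :: rest) =
      if a = '~' ∧ (b = '-' ∨ b = '~') ∧ (c = '-' ∨ c = '~') then '~' :: '~' :: '~' :: rest
      else a :: b :: c :: rest := by
  by_cases ha : a = '~'
  · subst ha
    show (if (b = '-' ∨ b = '~') ∧ (c = '-' ∨ c = '~') then _ else _) = _
    by_cases hbc : (b = '-' ∨ b = '~') ∧ (c = '-' ∨ c = '~') <;> simp [hbc]
  · rw [pvSegFwd.eq_def]
    split
    · rename_i heq
      simp only [List.cons.injEq] at heq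
      exact absurd heq.1 ha
    · simp [ha]

theorem pvSegFwd_short (seg : List Char) (h : seg.length ≤ 2) : pvSegFwd seg = seg := by
  rw [pvSegFwd.eq_def]; split
  · simp at h
  · rfl

theorem pvSegFwd_len (seg : List Char) : (pvSegFwd seg).length = seg.length := by
  rw [pvSegFwd.eq_def]; split
  · split <;> simp
  · rfl

theorem pvSegFwd_no_hash (seg : List Char) (h : '#' ∉ seg) : '#' ∉ pvSegFwd seg := by
  rw [pvSegFwd.eq_def]; split
  · rename_i heq
    split <;> simp_all
  · exact h

theorem pvFixStart_eq (seg : List Char) : pvFixStart seg = pvSegFwd seg := by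
  match seg with
  | [] => rfl
  | [a] => rw [pvFixStart, if_neg (by simp), pvSegFwd_short _ (by simp)]
  | [a, b] => rw [pvFixStart, if_neg (by simp), pvSegFwd_short _ (by simp)]
  | a :: b :: c :: rest =>
    rw [pvFixStart, pvSegFwd_cons,
      show (3 : Int) = ((3 : Nat) : Int) by norm_num, PySem.List.slice_from_natCast]
    have g0 : PySem.List.pyGet? (a :: b :: c :: rest) 0 = some a := by simp [pysem]
    have g1 : PySem.List.pyGet? (a :: b :: c :: rest) 1 = some b := by simp [pysem]
    have g2 : PySem.List.pyGet? (a :: b :: c :: rest) 2 = some c := by simp [pysem]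
    rw [g0, g1, g2]
    by_cases hc : a = '~' ∧ (b = '-' ∨ b = '~') ∧ (c = '-' ∨ c = '~')
    · rw [if_pos hc, if_pos]
      · rfl
      · exact ⟨by simp, by simp [hc.1], by rcases hc.2.1 with h | h <;> simp [h],
          by rcases hc.2.2 with h | h <;> simp [h]⟩
    · rw [if_neg hc, if_neg]
      rintro ⟨-, h0, h1, h2⟩
      apply hc
      refine ⟨by simpa using h0, ?_, ?_⟩
      · rcases h1 with h | h <;> simp at h <;> simp [h]
      · rcases h2 with h | h <;> simp at h <;> simp [h]

theorem pvSegFwd_hash0 (r : List Char) : pvSegFwd ('#' :: r) = '#' :: r := by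
  rw [pvSegFwd.eq_def]
  split
  · rename_i heq; simp at heq
  · rfl

theorem pvSegFwd_hash1 (a : Char) (r : List Char) (ha : a ≠ '#') :
    pvSegFwd (a :: '#' :: r) = a :: '#' :: r := by
  rw [pvSegFwd.eq_def]
  split
  · rename_i heq
    simp only [List.cons.injEq] at heq
    obtain ⟨h1, h2, h3⟩ := heq
    subst h1; subst h3; rw [← h2]
    rw [if_neg (by simp)]
  · rfl

theorem pvSegFwd_hash2 (a b : Char) (r : List Char) :
    pvSegFwd (a :: b :: '#' :: r) = a :: b :: '#' :: r := by
  rw [pvSegFwd_cons, if_neg]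
  rintro ⟨-, -, h | h⟩ <;> simp at h

theorem pvSegFwd_append (t r : List Char) (ht : '#' ∉ t) :
    pvSegFwd (t ++ '#' :: r) = pvSegFwd t ++ '#' :: r := by
  match t with
  | [] => rw [List.nil_append, pvSegFwd_hash0]; rfl
  | [a] =>
    rw [pvSegFwd_short [a] (by simp)]
    exact pvSegFwd_hash1 a r (by intro h; subst h; simp at ht)
  | [a, b] =>
    rw [pvSegFwd_short [a, b] (by simp)]
    exact pvSegFwd_hash2 a b r
  | a :: b :: c :: u =>
    rw [show (a :: b :: c :: u) ++ '#' :: r = a :: b :: c :: (u ++ '#' :: r) by simp,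
      pvSegFwd_cons, pvSegFwd_cons]
    split <;> simp

-- ---- splitOnP / join facts on the '#' separator ----

theorem pvSplit_no_hash (l x : List Char) (hx : x ∈ List.splitOnP (· == '#') l) : '#' ∉ x := by
  induction l generalizing x with
  | nil => rw [List.splitOnP_nil] at hx; simp at hx; simp [hx]
  | cons a l ih =>
    rw [List.splitOnP_cons] at hx
    by_cases ha : a = '#'
    · rw [if_pos (by simp [ha])] at hx
      rcases List.mem_cons.1 hx with h | h
      · simp [h]
      · exact ih x h
    · rw [if_neg (by simp [ha])] at hx
      obtain ⟨h, t, hht⟩ := List.exists_cons_of_ne_nil (List.splitOnP_ne_nil (· == '#') l)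
      rw [hht] at hx
      rcases List.mem_cons.1 hx with hh | hh
      · subst hh
        intro hm
        rcases List.mem_cons.1 hm with h1 | h1
        · exact ha h1.symm
        · exact ih h (by rw [hht]; exact List.mem_cons_self ..) h1
      · exact ih x (by rw [hht]; exact List.mem_cons_of_mem _ hh)

theorem pvSplit_len_le (l x : List Char) (hx : x ∈ List.splitOnP (· == '#') l) :
    x.length ≤ l.length := by
  induction l generalizing x with
  | nil => rw [List.splitOnP_nil] at hx; simp at hx; simp [hx]
  | cons a l ih =>
    rw [List.splitOnP_cons] at hx
    by_cases ha : (a == '#') = true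
    · rw [if_pos ha] at hx
      rcases List.mem_cons.1 hx with h | h
      · simp [h]
      · exact (ih x h).trans (by simp)
    · rw [if_neg ha] at hx
      obtain ⟨h, t, hht⟩ := List.exists_cons_of_ne_nil (List.splitOnP_ne_nil (· == '#') l)
      rw [hht] at hx
      rcases List.mem_cons.1 hx with hh | hh
      · subst hh
        have := ih h (by rw [hht]; exact List.mem_cons_self ..)
        simpa using this
      · exact (ih x (by rw [hht]; exact List.mem_cons_of_mem _ hh)).trans (by simp)

theorem pvJoin_split (s : List Char) :
    PySem.Chars.join ['#'] (List.splitOnP (· == '#') s) = s := by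
  show List.intercalate ['#'] (List.splitOnP (· == '#') s) = s
  have := List.intercalate_splitOn s '#'
  rwa [List.splitOn] at this

theorem pvSplit_join (M : List (List Char)) (hM : M ≠ [])
    (h : ∀ x ∈ M, '#' ∉ x) :
    List.splitOnP (· == '#') (PySem.Chars.join ['#'] M) = M := by
  induction M with
  | nil => exact absurd rfl hM
  | cons a M ih =>
    match M with
    | [] =>
      rw [PySem.Chars.join_singleton]
      refine List.splitOnP_eq_single _ _ ?_
      intro x hx
      simp only [beq_iff_eq]
      intro hxe
      exact h a (by simp) (hxe ▸ hx)
    | b :: M' =>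
      rw [PySem.Chars.join_cons_cons,
        show a ++ ['#'] ++ PySem.Chars.join ['#'] (b :: M')
          = a ++ '#' :: PySem.Chars.join ['#'] (b :: M') by simp,
        List.splitOnP_first _ _ (by
          intro x hx
          simp only [beq_iff_eq]
          intro hxe
          exact h a (by simp) (hxe ▸ hx)) '#' (by simp),
        ih (by simp) (fun x hx => h x (List.mem_cons_of_mem _ hx))]

theorem pvJoin_append (L1 L2 : List (List Char)) (h1 : L1 ≠ []) (h2 : L2 ≠ []) :
    PySem.Chars.join ['#'] (L1 ++ L2)
      = PySem.Chars.join ['#'] L1 ++ '#' :: PySem.Chars.join ['#'] L2 := by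
  induction L1 with
  | nil => exact absurd rfl h1
  | cons a L1 ih =>
    match L1 with
    | [] =>
      obtain ⟨b, L2', hb⟩ := List.exists_cons_of_ne_nil h2
      subst hb
      rw [List.cons_append, List.nil_append, PySem.Chars.join_cons_cons,
        PySem.Chars.join_singleton]
      simp
    | c :: L1' =>
      have ihh := ih (by simp)
      rw [List.cons_append] at ihh
      rw [List.cons_append, List.cons_append, PySem.Chars.join_cons_cons, ihh,
        PySem.Chars.join_cons_cons]
      simp

theorem pvRev_join (M : List (List Char)) :
    (PySem.Chars.join ['#'] M).reverse =
      PySem.Chars.join ['#'] (M.reverse.map List.reverse) := by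
  induction M with
  | nil => simp [PySem.Chars.join_nil]
  | cons a M ih =>
    match M with
    | [] => simp [PySem.Chars.join_singleton]
    | b :: M' =>
      rw [PySem.Chars.join_cons_cons,
        show a ++ ['#'] ++ PySem.Chars.join ['#'] (b :: M')
          = a ++ '#' :: PySem.Chars.join ['#'] (b :: M') by simp]
      rw [show (a :: b :: M').reverse.map List.reverse
          = (b :: M').reverse.map List.reverse ++ [a.reverse] by simp]
      rw [pvJoin_append _ _ (by simp) (by simp), ← ih, PySem.Chars.join_singleton]
      simp

-- ---- the simultaneous pass equals the segment model ----

theorem pvStepB_id (s : List Char) (p : Nat) (h : s.getD p ' ' ≠ '#') :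
    pvStepB s (p : Int) = s := by
  unfold pvStepB
  rw [if_neg]
  rintro ⟨h1, -⟩
  rw [PySem.List.pyGetD_natCast] at h1
  exact h h1

theorem pvFoldB_free (s : List Char) (h : '#' ∉ s) (k : Nat) :
    (List.range k).foldl (fun (u : List Char) (p : Nat) => pvStepB u (p : Int)) s = s := by
  induction k with
  | zero => rfl
  | succ k ih =>
    rw [List.range_succ, List.foldl_append, ih]
    simp only [List.foldl_cons, List.foldl_nil]
    apply pvStepB_id
    intro hk
    rcases Nat.lt_or_ge k s.length with hlt | hge
    · rw [List.getD_eq_getElem _ _ hlt] at hk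
      exact h (hk ▸ List.getElem_mem hlt)
    · rw [List.getD_eq_default _ _ hge] at hk
      simp at hk

theorem pvFoldB_skip (t v : List Char) (ht : '#' ∉ t) (k : Nat) (hk : k ≤ t.length) :
    (List.range k).foldl (fun (u : List Char) (p : Nat) => pvStepB u (p : Int)) (t ++ v)
      = t ++ v := by
  induction k with
  | zero => rfl
  | succ k ih =>
    rw [List.range_succ, List.foldl_append, ih (by omega)]
    simp only [List.foldl_cons, List.foldl_nil]
    apply pvStepB_id
    rw [List.getD_eq_getElem _ _ (by simp; omega), List.getElem_append_left (by omega)]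
    exact fun hk' => ht (hk' ▸ List.getElem_mem (by omega))

theorem pvStepB_shift (t v : List Char) (i : Nat) (hi : i + 4 ≤ v.length) :
    pvStepB (t ++ v) ((t.length + i : Nat) : Int) = t ++ pvStepB v (i : Int) := by
  obtain ⟨v1, rest, hv, hv1⟩ : ∃ v1 rest, v = v1 ++ rest ∧ v1.length = i :=
    ⟨v.take i, v.drop i, (List.take_append_drop i v).symm, by simp; omega⟩
  have hr : 4 ≤ rest.length := by
    have := congrArg List.length hv; simp at this; omega
  match rest, hr with
  | a :: b :: c :: d :: w, _ =>
    subst hv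
    rw [show t ++ (v1 ++ a :: b :: c :: d :: w) = (t ++ v1) ++ a :: b :: c :: d :: w by simp,
      show ((t.length + i : Nat) : Int) = ((t ++ v1).length : Int) by simp [hv1],
      pvStepB_decomp, ← hv1, pvStepB_decomp]
    split <;> simp

theorem pvFoldB_shift (t v : List Char) (m : Nat) (hm : m + 3 ≤ v.length) :
    ((List.range m).map (t.length + ·)).foldl
        (fun (u : List Char) (p : Nat) => pvStepB u (p : Int)) (t ++ v)
      = t ++ (List.range m).foldl (fun (u : List Char) (p : Nat) => pvStepB u (p : Int)) v := by
  induction m with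
  | zero => rfl
  | succ m ih =>
    rw [List.range_succ, List.map_append, List.foldl_append, List.foldl_append, ih (by omega)]
    simp only [List.map_cons, List.map_nil, List.foldl_cons, List.foldl_nil]
    exact pvStepB_shift t _ m (by rw [pvFoldB_len]; omega)

theorem pvStepB_hash_head (r : List Char) (hr : 3 ≤ r.length) :
    pvStepB ('#' :: r) 0 = '#' :: pvSegFwd r := by
  match r, hr with
  | x :: y :: z :: rest, _ =>
    have h := pvStepB_decomp [] rest '#' x y z
    simp only [List.nil_append, List.length_nil, Nat.cast_zero] at h
    rw [h, pvSegFwd_cons]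
    by_cases hc : x = '~' ∧ (y = '-' ∨ y = '~') ∧ (z = '-' ∨ z = '~')
    · rw [if_pos (by simpa using hc), if_pos hc, hc.1]
    · rw [if_neg (by simpa using hc), if_neg hc]

theorem pvDropWhile_head (p : Char → Bool) (l : List Char) (c : Char) (r : List Char)
    (h : l.dropWhile p = c :: r) : p c = false := by
  induction l with
  | nil => simp at h
  | cons x xs ih =>
    rw [List.dropWhile_cons] at h
    by_cases hp : p x = true
    · rw [if_pos hp] at h; exact ih h
    · rw [if_neg hp] at h
      injection h with h1 _
      rw [← h1]
      simpa using hp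

-- decomposition at the first '#'
theorem pvDecomp (s : List Char) (hs : '#' ∈ s) :
    ∃ t r, s = t ++ '#' :: r ∧ '#' ∉ t := by
  have hd : s.dropWhile (· != '#') ≠ [] := by
    rw [Ne, List.dropWhile_eq_nil_iff]
    intro hall
    have := hall '#' hs
    simp at this
  obtain ⟨c, r, hcr⟩ := List.exists_cons_of_ne_nil hd
  have hc : c = '#' := by
    have := pvDropWhile_head (· != '#') s c r hcr
    simpa using this
  refine ⟨s.takeWhile (· != '#'), r, ?_, ?_⟩
  · conv_lhs => rw [← List.takeWhile_append_dropWhile (p := (· != '#')) (l := s)]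
    rw [hcr, hc]
  · intro hm
    have := List.mem_takeWhile_imp hm
    simp at this

-- model after a forward fix of the whole remainder
theorem pvModelFwd (r : List Char) :
    pvModelL (pvSegFwd r) =
      PySem.Chars.join ['#'] ((List.splitOnP (· == '#') r).map pvSegFwd) := by
  by_cases hr : '#' ∈ r
  · obtain ⟨t, r', hdec, ht⟩ := pvDecomp r hr
    subst hdec
    rw [pvSegFwd_append _ _ ht]
    unfold pvModelL
    rw [List.splitOnP_first _ _ (by
        intro x hx
        simp only [beq_iff_eq]
        intro he
        exact pvSegFwd_no_hash t ht (he ▸ hx)) '#' (by simp) r',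
      List.splitOnP_first _ _ (by
        intro x hx
        simp only [beq_iff_eq]
        intro he
        exact ht (he ▸ hx)) '#' (by simp) r']
    simp [pvMapTail]
  · have h1 : List.splitOnP (· == '#') r = [r] :=
      List.splitOnP_eq_single _ _ (by
        intro x hx
        simp only [beq_iff_eq]
        intro he
        exact hr (he ▸ hx))
    have h2 : List.splitOnP (· == '#') (pvSegFwd r) = [pvSegFwd r] :=
      List.splitOnP_eq_single _ _ (by
        intro x hx
        simp only [beq_iff_eq]
        intro he
        exact pvSegFwd_no_hash r hr (he ▸ hx))
    unfold pvModelL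
    rw [h1, h2]
    simp [pvMapTail, PySem.Chars.join_singleton]

theorem pvScan_model_aux : ∀ (n : Nat) (s : List Char), s.length ≤ n → pvScanN s = pvModelL s := by
  intro n
  induction n with
  | zero =>
    intro s hs
    have : s = [] := List.eq_nil_of_length_eq_zero (by omega)
    subst this
    rfl
  | succ n ih =>
    intro s hs
    by_cases hhash : '#' ∈ s
    · obtain ⟨t, r, hdec, ht⟩ := pvDecomp s hhash
      subst hdec
      have hsplit : List.splitOnP (· == '#') (t ++ '#' :: r)
          = t :: List.splitOnP (· == '#') r :=
        List.splitOnP_first _ _ (by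
          intro x hx
          simp only [beq_iff_eq]
          intro he
          exact ht (he ▸ hx)) '#' (by simp) r
      rcases Nat.lt_or_ge r.length 3 with hr | hr
      · -- too short after the block: nothing happens anywhere
        have hlen : (t ++ '#' :: r).length - 3 ≤ t.length := by simp; omega
        have hid : pvScanN (t ++ '#' :: r) = t ++ '#' :: r := by
          unfold pvScanN
          exact pvFoldB_skip t ('#' :: r) ht _ hlen
        rw [hid]
        unfold pvModelL
        rw [hsplit]
        simp only [pvMapTail]
        rw [List.map_congr_left (g := id) (by
          intro x hx
          exact pvSegFwd_short x ((pvSplit_len_le r x hx).trans (by omega)))]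
        rw [List.map_id, show t :: List.splitOnP (· == '#') r
            = List.splitOnP (· == '#') (t ++ '#' :: r) from hsplit.symm, pvJoin_split]
      · -- the block's window is live: one head step, then recurse on the fixed remainder
        have hlen : (t ++ '#' :: r).length - 3 = t.length + (r.length - 2) := by simp; omega
        unfold pvScanN
        rw [hlen, List.range_add, List.foldl_append, pvFoldB_skip t ('#' :: r) ht _ le_rfl,
          pvFoldB_shift t ('#' :: r) _ (by simp; omega)]
        rw [show r.length - 2 = 1 + (r.length - 3) by omega, List.range_add,
          List.foldl_append,
          show List.range 1 = [0] from rfl]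
        simp only [List.foldl_cons, List.foldl_nil, Nat.cast_zero]
        rw [pvStepB_hash_head r hr]
        have hsh := pvFoldB_shift ['#'] (pvSegFwd r) (r.length - 3) (by rw [pvSegFwd_len]; omega)
        simp only [List.singleton_append, List.length_cons, List.length_nil,
          Nat.zero_add] at hsh
        rw [hsh]
        have hrec : (List.range (r.length - 3)).foldl
            (fun (s : List Char) (p : Nat) => pvStepB s (p : Int)) (pvSegFwd r)
            = pvScanN (pvSegFwd r) := by
          unfold pvScanN
          rw [pvSegFwd_len]
        rw [hrec, ih (pvSegFwd r) (by rw [pvSegFwd_len]; simp at hs; omega), pvModelFwd]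
        unfold pvModelL
        rw [hsplit]
        simp only [pvMapTail]
        obtain ⟨g, gs, hg⟩ := List.exists_cons_of_ne_nil (List.splitOnP_ne_nil (· == '#') r)
        rw [hg]
        simp only [List.map_cons]
        rw [PySem.Chars.join_cons_cons]
        simp
    · have hid : pvScanN s = s := pvFoldB_free s hhash _
      have h1 : List.splitOnP (· == '#') s = [s] :=
        List.splitOnP_eq_single _ _ (by
        intro x hx
        simp only [beq_iff_eq]
        intro he
        exact hhash (he ▸ hx))
      rw [hid]
      unfold pvModelL
      rw [h1]
      simp only [pvMapTail, List.map_nil]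
      rw [PySem.Chars.join_singleton]

theorem pvScan_model (s : List Char) : pvScanN s = pvModelL s :=
  pvScan_model_aux s.length s le_rfl

-- ---- bridge: PySem's str.split to List.splitOnP ----

theorem pvGo_split (fuel : Nat) (l cur : List Char) (acc : List (List Char))
    (hf : l.length ≤ fuel) :
    PySem.Chars.splitOn.go ['#'] fuel l cur acc =
      acc.reverse ++ (List.splitOnP (· == '#') l).modifyHead (cur.reverse ++ ·) := by
  induction fuel generalizing l cur acc with
  | zero =>
    have hl : l = [] := List.eq_nil_of_length_eq_zero (by omega)
    subst hl
    rw [PySem.Chars.splitOn.go, List.splitOnP_nil]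
    simp
  | succ fuel ih =>
    match l with
    | [] =>
      rw [show PySem.Chars.splitOn.go ['#'] (fuel + 1) [] cur acc
          = (cur.reverse :: acc).reverse from by rw [PySem.Chars.splitOn.go]; omega,
        List.splitOnP_nil]
      simp
    | c :: rest =>
      rw [PySem.Chars.splitOn.go]
      by_cases hc : c = '#'
      · subst hc
        rw [if_pos (by simp [List.isPrefixOf])]
        simp only [List.length_cons] at hf
        simp only [List.length_cons, List.drop_succ_cons, List.drop_zero, List.length_nil]
        rw [ih _ _ _ (by simpa using hf)]
        rw [List.splitOnP_cons, if_pos (by simp)]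
        simp [show (fun x : List Char => x) = id from rfl]
      · rw [if_neg (by
          simp only [List.isPrefixOf, Bool.and_true, beq_iff_eq]
          exact fun h => hc h.symm)]
        simp only [List.length_cons] at hf
        rw [ih _ _ _ (by omega)]
        rw [List.splitOnP_cons, if_neg (by simp [hc]), List.modifyHead_modifyHead]
        congr 2
        funext x
        simp

theorem pvChars_split_eq (s : List Char) :
    PySem.Chars.splitOn s ['#'] = List.splitOnP (· == '#') s := by
  rw [PySem.Chars.splitOn, pvGo_split _ _ _ _ (by omega)]
  simp [show (fun x : List Char => x) = id from rfl]

-- ---- assembling both sides over the segment list ----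

theorem pvModelL_join (M : List (List Char)) (hne : M ≠ []) (hfree : ∀ x ∈ M, '#' ∉ x) :
    pvModelL (PySem.Chars.join ['#'] M) = PySem.Chars.join ['#'] (pvMapTail M) := by
  unfold pvModelL
  rw [pvSplit_join M hne hfree]

-- B's indexed map over all segments but the first/last, tail part
theorem pvBmap (gl : List Char) (ks : List (List Char)) : ∀ (j last : Int), 1 ≤ j →
    j + ks.length = last →
    (PySem.List.enumerate (ks ++ [gl]) j).map
      (fun p => if p.1 < last then
          (pvSegFwd (if 0 < p.1 then pvSegFwd p.2 else p.2).reverse).reverse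
        else (if 0 < p.1 then pvSegFwd p.2 else p.2))
    = ks.map (fun g => (pvSegFwd (pvSegFwd g).reverse).reverse) ++ [pvSegFwd gl] := by
  induction ks with
  | nil =>
    intro j last h1 h2
    simp only [List.length_nil, Nat.cast_zero, add_zero] at h2
    subst h2
    simp only [List.nil_append, PySem.List.enumerate_cons, PySem.List.enumerate_nil,
      List.map_cons, List.map_nil]
    rw [if_neg (by omega), if_pos (by omega)]
  | cons k ks ih =>
    intro j last h1 h2
    simp only [List.length_cons] at h2
    rw [List.cons_append, PySem.List.enumerate_cons, List.map_cons]
    rw [ih (j + 1) last (by omega) (by push_cast at h2 ⊢; omega)]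
    have hj : (0 : Int) < j := by omega
    have hl : j < last := by push_cast at h2; omega
    simp [hj, hl]

theorem pvMain (s : List Char) :
    (pvModelL ((pvModelL s).reverse)).reverse =
      PySem.Chars.join ['#'] ((PySem.List.enumerate (List.splitOnP (· == '#') s)).map
        (fun p => if p.1 < PySem.List.len (List.splitOnP (· == '#') s) - 1 then
            (pvSegFwd (if 0 < p.1 then pvSegFwd p.2 else p.2).reverse).reverse
          else (if 0 < p.1 then pvSegFwd p.2 else p.2))) := by
  obtain ⟨g0, gs, hL⟩ :=
    List.exists_cons_of_ne_nil (List.splitOnP_ne_nil (· == '#') s)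
  have hfree : ∀ x ∈ List.splitOnP (· == '#') s, '#' ∉ x := fun x hx => pvSplit_no_hash s x hx
  rcases List.eq_nil_or_concat gs with rfl | ⟨ks, gl, rfl⟩
  · -- a single segment: no '#', nothing changes
    have hg0 : '#' ∉ g0 := hfree g0 (by rw [hL]; simp)
    have h1 : pvModelL s = g0 := by
      unfold pvModelL
      rw [hL]
      simp [pvMapTail, PySem.Chars.join_singleton]
    have h2 : pvModelL g0.reverse = g0.reverse := by
      unfold pvModelL
      rw [List.splitOnP_eq_single _ _ (by
        intro x hx
        simp only [beq_iff_eq]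
        intro he
        exact hg0 (by rw [← List.mem_reverse]; exact he ▸ hx))]
      simp [pvMapTail, PySem.Chars.join_singleton]
    rw [h1, h2, List.reverse_reverse, hL]
    simp only [PySem.List.enumerate_cons, PySem.List.enumerate_nil, List.map_cons,
      List.map_nil, PySem.List.len_eq]
    rw [if_neg (by simp), PySem.Chars.join_singleton, if_neg (by omega)]
  · -- at least one block: head gets the backward fix, middles both, the tail segment forward
    have hg0 : '#' ∉ g0 := hfree g0 (by rw [hL]; simp)
    have hks : ∀ g ∈ ks, '#' ∉ g := fun g hg => hfree g (by rw [hL]; simp [List.concat_eq_append, hg])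
    have hgl : '#' ∉ gl := hfree gl (by rw [hL]; simp [List.concat_eq_append])
    have h1 : pvModelL s =
        PySem.Chars.join ['#'] (g0 :: (ks.map pvSegFwd ++ [pvSegFwd gl])) := by
      unfold pvModelL
      rw [hL]
      simp [pvMapTail, List.concat_eq_append]
    rw [h1, pvRev_join, pvModelL_join _ (by simp) (by
      intro x hx
      rw [List.mem_map] at hx
      obtain ⟨y, hy, rfl⟩ := hx
      rw [List.mem_reverse] at hy
      have hy' : '#' ∉ y := by
        rcases List.mem_cons.1 hy with rfl | hy2
        · exact hg0
        · rcases List.mem_append.1 hy2 with h3 | h3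
          · obtain ⟨k, hk, rfl⟩ := List.mem_map.1 h3
            exact pvSegFwd_no_hash _ (hks k hk)
          · rw [List.mem_singleton] at h3
            subst h3
            exact pvSegFwd_no_hash _ hgl
      simpa [List.mem_reverse] using hy')]
    rw [pvRev_join]
    rw [hL, List.concat_eq_append, PySem.List.enumerate_cons, List.map_cons]
    have hlast : PySem.List.len (g0 :: (ks ++ [gl])) - 1 = 1 + (ks.length : Int) := by
      simp [PySem.List.len_eq]
      ring
    rw [hlast, show (0 : Int) + 1 = 1 from by norm_num,
      pvBmap gl ks 1 (1 + (ks.length : Int)) (by omega) rfl]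
    rw [if_pos (by positivity), if_neg (by omega)]
    congr 1
    simp [List.reverse_cons, List.reverse_append, List.map_append, List.map_reverse,
      List.reverse_reverse, pvMapTail, List.map_map, Function.comp]

-- ===== VERDICT (by name: the statement is the Claim_ definition above) =====
theorem fill_protected_squares_spec : Claim_equal_fill_protected_squares := by
  intro xw _
  unfold Spec_fill_protected_squares fill_protected_squares fill_protected_squares_alt
  simp only [PySem.List.slice?_none_none_neg_one, Option.getD_some, pvPass_scan,
    pvScan_model, pvChars_split_eq, pvFixStart_eq]
  exact congrArg String.ofList (pvMain xw.toList)
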